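-- pv_equiv track=rewrite | github.com/MadTracks/Python-Projects | divide_and_conquer_algorithms/divide_and_conquer.py | evaluate_gain
-- ===== SOURCE A (Python) =====
-- def evaluate_gain(cost,price,startindex):
--     if len(cost)<1:
--         return [startindex,False]
--     if len(cost) == 1:
--         gain = price[0]-cost[0]
--         return [startindex,gain]
--     if len(cost)>1:
--         first_half=evaluate_gain(cost[0:len(cost)//2],price[0:len(cost)//2],startindex)
--         last_half=evaluate_gain(cost[len(cost)//2:len(cost)],price[len(cost)//2:len(cost)],startindex+len(cost)//2)
--         gain = max(first_half[1],last_half[1])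
--         if gain == first_half[1]:
--             return first_half
--         else:
--             return last_half
-- ===== SOURCE B (Python) =====
-- def evaluate_gain(cost, price, startindex):
--     gains = [p - c for c, p in zip(cost, price)]
--     best_i = 0
--     best_g = gains[0]
--     for i, g in enumerate(gains[1:], 1):
--         if g > best_g:
--             best_i = i
--             best_g = g
--     return [startindex + best_i, best_g]
-- ===== Notes on version B (the rewrite author's own statement) =====
-- stated objective: faster
-- what changed: Replaced the divide-and-conquer recursion (which copies list slices at every level) with a single left-to-right scan over the gains that keeps the first index of the maximum.
-- outside the precondition, e.g. on evaluate_gain([], [], 7): A returns [7, False], B raises IndexError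
import Mathlib
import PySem

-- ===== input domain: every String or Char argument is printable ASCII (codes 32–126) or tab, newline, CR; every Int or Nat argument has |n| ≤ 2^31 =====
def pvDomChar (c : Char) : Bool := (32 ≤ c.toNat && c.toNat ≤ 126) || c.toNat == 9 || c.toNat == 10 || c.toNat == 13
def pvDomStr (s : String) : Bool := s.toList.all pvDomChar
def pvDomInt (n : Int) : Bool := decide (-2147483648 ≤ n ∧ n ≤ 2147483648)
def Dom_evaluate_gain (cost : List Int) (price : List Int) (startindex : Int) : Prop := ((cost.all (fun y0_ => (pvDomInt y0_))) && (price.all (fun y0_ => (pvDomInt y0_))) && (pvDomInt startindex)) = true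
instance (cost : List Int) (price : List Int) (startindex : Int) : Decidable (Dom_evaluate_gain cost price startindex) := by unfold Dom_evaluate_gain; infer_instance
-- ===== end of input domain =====

-- B replaces A's slice-copying divide-and-conquer with one linear scan over the gains,
-- keeping the first (leftmost) index of the maximum gain.


-- ===== PORT A =====
-- Literal port of A's divide-and-conquer recursion.  len(cost)//2 is written as Nat
-- division (cost.length ≥ 0, so Python's floor division coincides with it).
-- price[0] on an empty 'price' raises IndexError in Python (excluded by Pre_);
-- pyGetD totalises that access.
def evaluate_gain (cost : List Int) (price : List Int) (startindex : Int) : List Int :=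
  if cost.length < 1 then
    [startindex, 0]  -- Python returns [startindex, False]: not an int, excluded by Pre_
  else if cost.length = 1 then
    [startindex, PySem.List.pyGetD price 0 0 - PySem.List.pyGetD cost 0 0]
  else
    let m : Nat := cost.length / 2
    let first_half := evaluate_gain (PySem.List.slice cost (some 0) (some (m : Int)))
        (PySem.List.slice price (some 0) (some (m : Int))) startindex
    let last_half := evaluate_gain (PySem.List.slice cost (some (m : Int)) (some (cost.length : Int)))
        (PySem.List.slice price (some (m : Int)) (some (cost.length : Int))) (startindex + (m : Int))
    let gain := max (PySem.List.pyGetD first_half 1 0) (PySem.List.pyGetD last_half 1 0)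
    if gain = PySem.List.pyGetD first_half 1 0 then first_half else last_half
termination_by cost.length
decreasing_by
  · rw [PySem.List.slice_zero_start, PySem.List.slice_to_natCast]; simp; omega
  · rw [PySem.List.slice_natCast]; simp; omega

-- ===== PORT B =====
-- the for-loop of Source B: state (i, best_i, best_g) over the remaining gains
def pvAltLoop (gs : List Int) (i : Int) (bi : Int) (bg : Int) : Int × Int :=
  match gs with
  | [] => (bi, bg)
  | g :: rest => if g > bg then pvAltLoop rest (i + 1) i g else pvAltLoop rest (i + 1) bi bg

def evaluate_gain_alt (cost : List Int) (price : List Int) (startindex : Int) : List Int :=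
  let gains := (cost.zip price).map (fun cp => cp.2 - cp.1)
  match gains with
  | [] => [startindex, 0]  -- gains[0] raises IndexError in Python here (excluded by Pre_)
  | g :: rest =>
    let r := pvAltLoop rest 1 0 g
    [startindex + r.1, r.2]

-- ===== PRECONDITION & SPEC =====
-- Pre_ excludes: empty cost, where A returns [startindex, False] — False is not an int
-- (and B raises IndexError); and price shorter than cost, where A raises IndexError.
def Pre_evaluate_gain (cost : List Int) (price : List Int) (startindex : Int) : Prop :=
  cost ≠ [] ∧ cost.length ≤ price.length
instance (cost : List Int) (price : List Int) (startindex : Int) : Decidable (Pre_evaluate_gain cost price startindex) := by unfold Pre_evaluate_gain; infer_instance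
def pvWitness_evaluate_gain : List Int × List Int × Int := ([1, 2, 3], [4, 1, 7], 5)

def Spec_evaluate_gain (cost : List Int) (price : List Int) (startindex : Int) (out : List Int) : Prop := out = evaluate_gain_alt cost price startindex
instance (cost : List Int) (price : List Int) (startindex : Int) (out : List Int) : Decidable (Spec_evaluate_gain cost price startindex out) := by unfold Spec_evaluate_gain; infer_instance

-- ===== CLAIM (what is proved, stated in full; the proofs are below) =====
def Claim_equal_evaluate_gain : Prop := ∀ (cost : List Int) (price : List Int) (startindex : Int), Dom_evaluate_gain cost price startindex → Pre_evaluate_gain cost price startindex → Spec_evaluate_gain cost price startindex (evaluate_gain cost price startindex)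

-- ===== LEMMAS AND PROOFS =====

-- leftmost maximum of a nonempty list, as (index, value)
def pvBest : List Int → Int × Int
  | [] => (0, 0)
  | [g] => (0, g)
  | g :: g' :: rest =>
    let r := pvBest (g' :: rest)
    if r.2 > g then (r.1 + 1, r.2) else (0, g)

theorem pvBest_append (xs ys : List Int) (hx : xs ≠ []) (hy : ys ≠ []) :
    pvBest (xs ++ ys) =
      if (pvBest ys).2 > (pvBest xs).2 then ((xs.length : Int) + (pvBest ys).1, (pvBest ys).2)
      else pvBest xs := by
  induction xs with
  | nil => simp at hx
  | cons x xs ih =>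
    match xs with
    | [] =>
      match ys, hy with
      | y :: ys', _ =>
        simp only [List.cons_append, List.nil_append, pvBest]
        split_ifs <;> simp_all <;> omega
    | x' :: xs' =>
      have hrec := ih (by simp)
      simp only [List.cons_append] at hrec ⊢
      simp only [pvBest]
      rw [hrec]
      split_ifs <;> simp_all <;> omega

theorem pvAltLoop_eq (gs : List Int) (i bi bg : Int) (h : gs ≠ []) :
    pvAltLoop gs i bi bg =
      if (pvBest gs).2 > bg then (i + (pvBest gs).1, (pvBest gs).2) else (bi, bg) := by
  induction gs generalizing i bi bg with
  | nil => simp at h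
  | cons g rest ih =>
    match rest with
    | [] =>
      simp only [pvAltLoop, pvBest]
      split_ifs <;> simp_all
    | g' :: rest' =>
      rw [show pvAltLoop (g :: g' :: rest') i bi bg
            = if g > bg then pvAltLoop (g' :: rest') (i + 1) i g
              else pvAltLoop (g' :: rest') (i + 1) bi bg from rfl]
      rw [show pvBest (g :: g' :: rest')
            = (if (pvBest (g' :: rest')).2 > g then ((pvBest (g' :: rest')).1 + 1, (pvBest (g' :: rest')).2)
               else (0, g)) from rfl]
      by_cases hgb : g > bg <;>
        simp only [hgb, if_true, if_false, ite_true, ite_false] <;>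
        rw [ih _ _ _ (by simp)] <;>
        rcases hlt : pvBest (g' :: rest') with ⟨ri, rg⟩ <;>
        simp only [] <;> split_ifs <;> simp_all <;> omega

theorem pvZip_take_right (l l' : List Int) (n : Nat) (h : l.length ≤ n) :
    l.zip (l'.take n) = l.zip l' := by
  induction l generalizing l' n with
  | nil => simp
  | cons x xs ih =>
    match l', n with
    | [], _ => simp
    | y :: ys, n + 1 => simp at h ⊢; exact ih ys n h

theorem pvZip_take (cost price : List Int) (m : Nat) :
    ((cost.take m).zip (price.take m)).map (fun cp => cp.2 - cp.1)
      = ((cost.zip price).map (fun cp => cp.2 - cp.1)).take m := by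
  simp [List.zip, List.map_zipWith, List.take_zipWith]

theorem pvZip_drop (cost price : List Int) (m : Nat) :
    ((cost.drop m).zip (price.drop m)).map (fun cp => cp.2 - cp.1)
      = ((cost.zip price).map (fun cp => cp.2 - cp.1)).drop m := by
  simp [List.zip, List.map_zipWith, List.drop_zipWith]

theorem evaluate_gain_eq_aux (n : Nat) : ∀ (cost price : List Int) (s : Int),
    cost.length = n → cost ≠ [] → cost.length ≤ price.length →
    evaluate_gain cost price s =
      [s + (pvBest ((cost.zip price).map (fun cp => cp.2 - cp.1))).1,
       (pvBest ((cost.zip price).map (fun cp => cp.2 - cp.1))).2] := by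
  induction n using Nat.strong_induction_on with
  | _ n ih =>
    intro cost price s hn hne hle
    rw [evaluate_gain]
    by_cases h1 : cost.length < 1
    · exact absurd (List.eq_nil_of_length_eq_zero (by omega)) hne
    by_cases h2 : cost.length = 1
    · simp only [h2, if_true]
      obtain ⟨c, rfl⟩ := List.length_eq_one_iff.1 h2
      match price with
      | p :: ps => simp [PySem.List.pyGetD_zero_cons, pvBest]
    · simp only [h1, h2, if_false]
      rw [PySem.List.slice_zero_start, PySem.List.slice_to_natCast,
          PySem.List.slice_zero_start, PySem.List.slice_to_natCast,
          PySem.List.slice_natCast, PySem.List.slice_natCast]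
      set m : Nat := cost.length / 2 with hm
      have hmlt : m < cost.length := by omega
      have hm1 : 1 ≤ m := by omega
      have hdt : (cost.drop m).take (cost.length - m) = cost.drop m := by
        apply List.take_of_length_le; simp
      rw [hdt]
      have hA := ih m (by omega) (cost.take m) (price.take m) s
        (by simp; omega) (by simp [List.take_eq_nil_iff]; exact ⟨by omega, hne⟩) (by simp; omega)
      have hB := ih (cost.length - m) (by omega) (cost.drop m) ((price.drop m).take (cost.length - m)) (s + (m : Int))
        (by simp) (by simp [List.drop_eq_nil_iff]; omega) (by simp; omega)
      rw [pvZip_take] at hA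
      rw [pvZip_take_right _ _ _ (by simp), pvZip_drop] at hB
      rw [hA, hB]
      set gains := ((cost.zip price)).map (fun cp : Int × Int => cp.2 - cp.1) with hg
      have hglen : gains.length = cost.length := by
        rw [hg]; simp [List.length_zip]; omega
      have hta : gains.take m ++ gains.drop m = gains := List.take_append_drop m gains
      have htl : (gains.take m).length = m := by simp; omega
      have hPB := pvBest_append (gains.take m) (gains.drop m)
        (by rw [Ne, List.take_eq_nil_iff]; push Not
            exact ⟨by omega, fun hg' => by rw [hg'] at hglen; simp at hglen; omega⟩)
        (by simp [List.drop_eq_nil_iff]; omega)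
      rw [hta, htl] at hPB
      rw [hPB]
      rw [show PySem.List.pyGetD [s + (pvBest (gains.take m)).1, (pvBest (gains.take m)).2] 1 0
            = (pvBest (gains.take m)).2 from rfl,
          show PySem.List.pyGetD [s + (m:Int) + (pvBest (gains.drop m)).1, (pvBest (gains.drop m)).2] 1 0
            = (pvBest (gains.drop m)).2 from rfl]
      by_cases hgt : (pvBest (gains.drop m)).2 > (pvBest (gains.take m)).2
      · have hmx : max (pvBest (gains.take m)).2 (pvBest (gains.drop m)).2
            = (pvBest (gains.drop m)).2 := max_eq_right (le_of_lt hgt)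
        rw [hmx, if_neg (by omega), if_pos hgt]
        simp [add_assoc]
      · have hmx : max (pvBest (gains.take m)).2 (pvBest (gains.drop m)).2
            = (pvBest (gains.take m)).2 := max_eq_left (by omega)
        rw [hmx, if_pos rfl, if_neg hgt]

theorem evaluate_gain_alt_eq (cost price : List Int) (s : Int)
    (h : (cost.zip price).map (fun cp : Int × Int => cp.2 - cp.1) ≠ []) :
    evaluate_gain_alt cost price s =
      [s + (pvBest ((cost.zip price).map (fun cp => cp.2 - cp.1))).1,
       (pvBest ((cost.zip price).map (fun cp => cp.2 - cp.1))).2] := by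
  unfold evaluate_gain_alt
  match hg : (cost.zip price).map (fun cp : Int × Int => cp.2 - cp.1) with
  | [] => exact absurd hg h
  | [g] => simp [pvAltLoop, pvBest]
  | g :: g' :: rest =>
    show [s + (pvAltLoop (g' :: rest) 1 0 g).1, (pvAltLoop (g' :: rest) 1 0 g).2] = _
    rw [pvAltLoop_eq _ _ _ _ (by simp)]
    rw [show pvBest (g :: g' :: rest)
          = (if (pvBest (g' :: rest)).2 > g then ((pvBest (g' :: rest)).1 + 1, (pvBest (g' :: rest)).2)
             else (0, g)) from rfl]
    split_ifs <;> simp <;> omega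

-- ===== VERDICT (by name: the statement is the Claim_ definition above) =====
theorem evaluate_gain_spec : Claim_equal_evaluate_gain := by
  intro cost price s _ hpre
  obtain ⟨hne, hlen⟩ := hpre
  unfold Spec_evaluate_gain
  rw [evaluate_gain_eq_aux cost.length cost price s rfl hne hlen, evaluate_gain_alt_eq]
  intro h
  have hc : cost.length ≠ 0 := fun hh => hne (List.eq_nil_of_length_eq_zero hh)
  have hl := congrArg List.length h
  rw [List.length_map, List.length_zip] at hl
  simp only [List.length_nil] at hl
  omega
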